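-- pv_equiv track=rewrite | github.com/grapheneaffiliate/h4-polytopic-attention | solve_batch20.py | solve_cce03e0d
-- ===== SOURCE A (Python) =====
-- def solve_cce03e0d(grid):
--     h, w = len(grid), len(grid[0])
--     out = [[0]*w*3 for _ in range(h*3)]
--     for r in range(h):
--         for c in range(w):
--             if grid[r][c] == 2:
--                 for dr in range(h):
--                     for dc in range(w):
--                         out[r*h+dr][c*w+dc] = grid[dr][dc]
--     return out
-- ===== SOURCE B (Python) =====
-- def solve_cce03e0d(grid):
--     h, w = len(grid), len(grid[0])
--     return [
--         [grid[i % h][j % w]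
--          if i // h < h and j // w < w and grid[i // h][j // w] == 2 else 0
--          for j in range(w * 3)]
--         for i in range(h * 3)]
-- ===== Notes on version B (the rewrite author's own statement) =====
-- stated objective: alternative
-- what changed: Replaces the zero-fill-then-scatter stamping of whole grid copies (4 nested loops with in-place 2D assignment) by a single gather pass that computes each output cell directly from its block index (i//h, j//w) and offset (i%h, j%w).
import Mathlib
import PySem

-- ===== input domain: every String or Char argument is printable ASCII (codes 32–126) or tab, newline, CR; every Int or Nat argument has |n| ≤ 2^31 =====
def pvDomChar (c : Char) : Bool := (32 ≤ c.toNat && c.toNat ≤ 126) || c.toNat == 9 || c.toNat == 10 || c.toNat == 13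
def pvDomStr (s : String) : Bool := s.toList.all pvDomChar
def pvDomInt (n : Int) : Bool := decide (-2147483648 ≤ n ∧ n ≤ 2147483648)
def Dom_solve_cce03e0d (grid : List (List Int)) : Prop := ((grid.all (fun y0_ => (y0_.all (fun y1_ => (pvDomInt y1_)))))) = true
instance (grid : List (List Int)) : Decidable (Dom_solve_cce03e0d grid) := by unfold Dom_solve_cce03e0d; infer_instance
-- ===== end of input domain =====

-- B computes each output cell directly from its block index (i//h, j//w) and offset (i%h, j%w)
-- (a gather pass) instead of zero-filling and stamping whole grid copies into blocks whose
-- source cell is 2 (scatter with in-place 2D writes); objective: alternative decomposition.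

-- ===== PORT A =====
-- grid[r][c] (indices always nonnegative here; the default 0 is unreachable inside Pre_)
def pvG2 (grid : List (List Int)) (r c : Nat) : Int := (grid.getD r []).getD c 0
-- out[i][j] = v  (always in range inside Pre_; List.set is a no-op out of range)
def pvSet2 (out : List (List Int)) (i j : Nat) (v : Int) : List (List Int) :=
  out.set i ((out.getD i []).set j v)
-- the two innermost loops of A: stamp a copy of grid into block (r, c)
def pvStamp (grid : List (List Int)) (h w r c : Nat) (out : List (List Int)) : List (List Int) :=
  (List.range h).foldl (fun o dr =>
    (List.range w).foldl (fun o dc => pvSet2 o (r*h+dr) (c*w+dc) (pvG2 grid dr dc)) o) out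

def solve_cce03e0d (grid : List (List Int)) : List (List Int) :=
  let h := grid.length
  let w := (grid.getD 0 []).length
  (List.range h).foldl (fun o r =>
    (List.range w).foldl (fun o c =>
      if pvG2 grid r c = 2 then pvStamp grid h w r c o else o) o)
    (List.replicate (h*3) (List.replicate (w*3) (0:Int)))

-- ===== PORT B =====
def solve_cce03e0d_alt (grid : List (List Int)) : List (List Int) :=
  let h := grid.length
  let w := (grid.getD 0 []).length
  (List.range (h*3)).map (fun i =>
    (List.range (w*3)).map (fun j =>
      if i / h < h ∧ j / w < w ∧ (grid.getD (i / h) []).getD (j / w) 0 = 2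
      then (grid.getD (i % h) []).getD (j % w) 0 else 0))

-- ===== PRECONDITION & SPEC =====
-- Pre_ excludes exactly the inputs where the Python A raises (IndexError): the empty grid
-- (grid[0]), a row shorter than row 0 (the grid[r][c] test reads every column index < len(grid[0])),
-- and any cell equal to 2 at row index >= 3 or column index >= 3 (its stamp writes outside the
-- 3h x 3w output).
def Pre_solve_cce03e0d (grid : List (List Int)) : Prop :=
  grid ≠ [] ∧
  (∀ row ∈ grid, (grid.getD 0 []).length ≤ row.length) ∧
  (∀ r < grid.length, ∀ c < (grid.getD 0 []).length,
    (3 ≤ r ∨ 3 ≤ c) → (grid.getD r []).getD c 0 ≠ 2)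
instance (grid : List (List Int)) : Decidable (Pre_solve_cce03e0d grid) := by
  unfold Pre_solve_cce03e0d; infer_instance

def pvWitness_solve_cce03e0d : List (List Int) := [[2, 0], [0, 2]]

def Spec_solve_cce03e0d (grid : List (List Int)) (out : List (List Int)) : Prop := out = solve_cce03e0d_alt grid
instance (grid : List (List Int)) (out : List (List Int)) : Decidable (Spec_solve_cce03e0d grid out) := by unfold Spec_solve_cce03e0d; infer_instance

-- ===== CLAIM (what is proved, stated in full; the proofs are below) =====
def Claim_equal_solve_cce03e0d : Prop := ∀ (grid : List (List Int)), Dom_solve_cce03e0d grid → Pre_solve_cce03e0d grid → Spec_solve_cce03e0d grid (solve_cce03e0d grid)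

-- ===== LEMMAS AND PROOFS =====

-- out[i][j] as a total read
def pvGet (o : List (List Int)) (i j : Nat) : Int := (o.getD i []).getD j 0

theorem getD_set_lem (l : List Int) (a : Nat) (v : Int) (i : Nat) :
    ((l.set a v).getD i 0) = if a = i ∧ a < l.length then v else l.getD i 0 := by
  simp [List.getD, List.getElem?_set]
  split_ifs with h1 h2 h3 <;> simp_all <;> omega

theorem getD_set_lem' (l : List (List Int)) (a : Nat) (v : List Int) (i : Nat) :
    ((l.set a v).getD i []) = if a = i ∧ a < l.length then v else l.getD i [] := by
  simp [List.getD, List.getElem?_set]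
  split_ifs with h1 h2 h3 <;> simp_all <;> omega

theorem pvSet2_length (o : List (List Int)) (i j : Nat) (v : Int) :
    (pvSet2 o i j v).length = o.length := by
  simp [pvSet2]

theorem pvSet2_rowlen (o : List (List Int)) (i j : Nat) (v : Int) (k : Nat) :
    ((pvSet2 o i j v).getD k []).length = (o.getD k []).length := by
  rw [pvSet2, getD_set_lem']
  split_ifs with h1
  · obtain ⟨rfl, _⟩ := h1; simp
  · rfl

theorem pvGet_pvSet2 (o : List (List Int)) (a b : Nat) (v : Int) (i j : Nat) :
    pvGet (pvSet2 o a b v) i j =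
      if a = i ∧ b = j ∧ a < o.length ∧ b < (o.getD a []).length then v
      else pvGet o i j := by
  rw [pvGet, pvSet2, getD_set_lem']
  by_cases h1 : a = i ∧ a < o.length
  · rw [if_pos h1, getD_set_lem]
    obtain ⟨rfl, ha⟩ := h1
    split_ifs with h2 h3 h3
    · rfl
    · exact absurd ⟨rfl, h2.1, ha, h2.2⟩ h3
    · exact absurd ⟨h3.2.1, h3.2.2.2⟩ h2
    · rfl
  · rw [if_neg h1]
    split_ifs with h2
    · exact absurd ⟨h2.1, h2.2.2.1⟩ h1
    · rfl

theorem foldl_shape {α : Type} (f : List (List Int) → α → List (List Int)) (l : List α)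
    (hf : ∀ o a, (f o a).length = o.length ∧ ∀ k, ((f o a).getD k []).length = (o.getD k []).length) :
    ∀ o : List (List Int), (l.foldl f o).length = o.length ∧
      ∀ k, ((l.foldl f o).getD k []).length = (o.getD k []).length := by
  induction l with
  | nil => intro o; simp
  | cons x xs ih =>
    intro o
    simp only [List.foldl_cons]
    obtain ⟨h1, h2⟩ := hf o x
    obtain ⟨g1, g2⟩ := ih (f o x)
    exact ⟨g1.trans h1, fun k => (g2 k).trans (h2 k)⟩

theorem foldl_id {α β : Type} (f : β → α → β) (l : List α)
    (h : ∀ o a, a ∈ l → f o a = o) : ∀ o : β, l.foldl f o = o := by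
  induction l with
  | nil => intro o; rfl
  | cons x xs ih =>
    intro o
    simp only [List.foldl_cons]
    rw [h o x (by simp)]
    exact ih (fun o a ha => h o a (by simp [ha])) o

theorem inner_char (grid : List (List Int)) (h w r c dr : Nat) (o : List (List Int)) (m : Nat)
    (hlen : o.length = h*3) (hrow : ∀ k < h*3, (o.getD k []).length = w*3)
    (hR : r*h+dr < h*3) (hc : c < 3) (hm : m ≤ w) :
    ∀ i j, pvGet ((List.range m).foldl
        (fun o dc => pvSet2 o (r*h+dr) (c*w+dc) (pvG2 grid dr dc)) o) i j
      = if r*h+dr = i ∧ c*w ≤ j ∧ j < c*w + m then pvG2 grid dr (j - c*w) else pvGet o i j := by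
  induction m with
  | zero => intro i j; simp
  | succ m ih =>
    intro i j
    rw [List.range_succ, List.foldl_append, List.foldl_cons, List.foldl_nil]
    have hsh := foldl_shape (fun o dc => pvSet2 o (r*h+dr) (c*w+dc) (pvG2 grid dr dc))
      (List.range m) (fun o dc => ⟨pvSet2_length o _ _ _, fun k => pvSet2_rowlen o _ _ _ k⟩) o
    rw [pvGet_pvSet2]
    have hcw : c*w + m < w*3 := by
      have : c*w ≤ 2*w := Nat.mul_le_mul_right w (by omega)
      omega
    have hlen' : ((List.range m).foldl (fun o dc => pvSet2 o (r*h+dr) (c*w+dc) (pvG2 grid dr dc)) o).length = h*3 := hsh.1.trans hlen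
    have hrow' : (((List.range m).foldl (fun o dc => pvSet2 o (r*h+dr) (c*w+dc) (pvG2 grid dr dc)) o).getD (r*h+dr) []).length = w*3 := (hsh.2 _).trans (hrow _ hR)
    rw [hlen', hrow']
    split_ifs with h1 h2 h2
    · obtain ⟨rfl, rfl, _⟩ := h1
      simp
    · exact absurd ⟨h1.1, by omega, by omega⟩ h2
    · rw [ih (by omega) i j, if_pos ⟨h2.1, h2.2.1, by
        rcases Nat.lt_or_ge j (c*w+m) with hlt | hge
        · exact hlt
        · exact absurd ⟨h2.1, by omega, hR, by omega⟩ h1⟩]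
    · rw [ih (by omega) i j, if_neg (by
        intro hcon
        exact h2 ⟨hcon.1, hcon.2.1, by omega⟩)]

theorem stamp_shape (grid : List (List Int)) (h w r c : Nat) (o : List (List Int)) :
    ((List.range h).foldl (fun o dr => (List.range w).foldl
        (fun o dc => pvSet2 o (r*h+dr) (c*w+dc) (pvG2 grid dr dc)) o) o).length = o.length ∧
    ∀ k, (((List.range h).foldl (fun o dr => (List.range w).foldl
        (fun o dc => pvSet2 o (r*h+dr) (c*w+dc) (pvG2 grid dr dc)) o) o).getD k []).length
      = (o.getD k []).length := by
  exact foldl_shape _ _ (fun o dr => foldl_shape _ _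
    (fun o dc => ⟨pvSet2_length o _ _ _, fun k => pvSet2_rowlen o _ _ _ k⟩) o) o

theorem stamp_char (grid : List (List Int)) (h w r c : Nat) (o : List (List Int)) (n : Nat)
    (hlen : o.length = h*3) (hrow : ∀ k < h*3, (o.getD k []).length = w*3)
    (hr : r < 3) (hc : c < 3) (hn : n ≤ h) :
    ∀ i j, pvGet ((List.range n).foldl (fun o dr => (List.range w).foldl
        (fun o dc => pvSet2 o (r*h+dr) (c*w+dc) (pvG2 grid dr dc)) o) o) i j
      = if r*h ≤ i ∧ i < r*h + n ∧ c*w ≤ j ∧ j < c*w + w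
        then pvG2 grid (i - r*h) (j - c*w) else pvGet o i j := by
  induction n with
  | zero =>
    intro i j
    rw [List.range_zero, List.foldl_nil, if_neg (by omega)]
  | succ n ih =>
    intro i j
    rw [List.range_succ, List.foldl_append, List.foldl_cons, List.foldl_nil]
    have hsh := foldl_shape (fun o dr => (List.range w).foldl
        (fun o dc => pvSet2 o (r*h+dr) (c*w+dc) (pvG2 grid dr dc)) o) (List.range n)
      (fun o dr => foldl_shape _ _
        (fun o dc => ⟨pvSet2_length o _ _ _, fun k => pvSet2_rowlen o _ _ _ k⟩) o) o
    have hR : r*h + n < h*3 := by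
      have : r*h ≤ 2*h := Nat.mul_le_mul_right h (by omega)
      omega
    rw [inner_char grid h w r c n _ w (hsh.1.trans hlen)
        (fun k hk => (hsh.2 k).trans (hrow k hk)) hR hc le_rfl i j]
    split_ifs with h1 h2 h2
    · obtain ⟨rfl, _⟩ := h1
      congr 1
      omega
    · exact absurd ⟨by omega, by omega, h1.2.1, h1.2.2⟩ h2
    · rw [ih (by omega) i j, if_pos ⟨h2.1, by
        rcases Nat.lt_or_ge i (r*h+n) with hlt | hge
        · exact hlt
        · exact absurd ⟨by omega, h2.2.2.1, h2.2.2.2⟩ h1, h2.2.2.1, h2.2.2.2⟩]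
    · rw [ih (by omega) i j, if_neg (fun hcon => h2 ⟨hcon.1, by omega, hcon.2.2⟩)]

theorem div_block (j w m : Nat) (hw : 0 < w) : j / w = m ↔ (m*w ≤ j ∧ j < m*w + w) := by
  rw [show (j/w = m) ↔ (m ≤ j/w ∧ j/w < m+1) from by omega,
      Nat.le_div_iff_mul_le hw, Nat.div_lt_iff_lt_mul hw, Nat.succ_mul]

theorem mod_block (j w m : Nat) (hd : j / w = m) : j % w = j - m*w := by
  have h2 := Nat.div_add_mod j w
  rw [hd, Nat.mul_comm] at h2
  generalize hp : m*w = p at h2 ⊢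
  omega

theorem row_step_shape (grid : List (List Int)) (h w r : Nat) :
    ∀ (o : List (List Int)) (c : Nat),
      ((if pvG2 grid r c = 2 then pvStamp grid h w r c o else o).length = o.length) ∧
      ∀ k, (((if pvG2 grid r c = 2 then pvStamp grid h w r c o else o)).getD k []).length
        = (o.getD k []).length := by
  intro o c
  split_ifs with hg
  · exact ⟨(stamp_shape grid h w r c o).1, (stamp_shape grid h w r c o).2⟩
  · exact ⟨rfl, fun _ => rfl⟩

theorem row_char (grid : List (List Int)) (h w r : Nat) (o : List (List Int)) (m : Nat)
    (hlen : o.length = h*3) (hrow : ∀ k < h*3, (o.getD k []).length = w*3)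
    (hr : r < 3) (hw : 0 < w) (hm : m ≤ w)
    (hP : ∀ c < w, 3 ≤ c → pvG2 grid r c ≠ 2) :
    ∀ i j, pvGet ((List.range m).foldl
        (fun o c => if pvG2 grid r c = 2 then pvStamp grid h w r c o else o) o) i j
      = if r*h ≤ i ∧ i < r*h + h ∧ j / w < m ∧ pvG2 grid r (j / w) = 2
        then pvG2 grid (i - r*h) (j % w) else pvGet o i j := by
  induction m with
  | zero =>
    intro i j
    rw [List.range_zero, List.foldl_nil, if_neg (by rintro ⟨-, -, hlt, -⟩; exact Nat.not_lt_zero _ hlt)]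
  | succ m ih =>
    intro i j
    rw [List.range_succ, List.foldl_append, List.foldl_cons, List.foldl_nil]
    have hsh := foldl_shape _ (List.range m) (row_step_shape grid h w r) o
    have hlen' := hsh.1.trans hlen
    have hrow' : ∀ k < h*3, (((List.range m).foldl
        (fun o c => if pvG2 grid r c = 2 then pvStamp grid h w r c o else o) o).getD k []).length = w*3 :=
      fun k hk => (hsh.2 k).trans (hrow k hk)
    by_cases hg : pvG2 grid r m = 2
    · have hm3 : m < 3 := by
        by_contra hge
        exact hP m (by omega) (by omega) hg
      rw [if_pos hg]
      show pvGet ((List.range h).foldl _ _) i j = _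
      rw [stamp_char grid h w r m _ h hlen' hrow' hr hm3 le_rfl i j]
      split_ifs with h1 h2 h2
      · obtain ⟨_, _, hj1, hj2⟩ := h1
        have hd : j / w = m := (div_block j w m hw).mpr ⟨hj1, hj2⟩
        rw [mod_block j w m hd]
      · obtain ⟨hi1, hi2, hj1, hj2⟩ := h1
        have hd : j / w = m := (div_block j w m hw).mpr ⟨hj1, hj2⟩
        exact absurd ⟨hi1, hi2, by omega, by rw [hd]; exact hg⟩ h2
      · -- stamp cond false, new cond true: must come from ih region (j/w < m)
        obtain ⟨hi1, hi2, hj1, hj2⟩ := h2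
        rcases Nat.lt_or_ge (j/w) m with hlt | hge
        · rw [ih (by omega) i j, if_pos ⟨hi1, hi2, hlt, hj2⟩]
        · have hd : j / w = m := by omega
          obtain ⟨e1, e2⟩ := (div_block j w m hw).mp hd
          exact absurd ⟨hi1, hi2, e1, e2⟩ h1
      · rw [ih (by omega) i j, if_neg (fun hcon => h2 ⟨hcon.1, hcon.2.1, by omega, hcon.2.2.2⟩)]
    · rw [if_neg hg, ih (by omega) i j]
      by_cases hcon : r*h ≤ i ∧ i < r*h + h ∧ j / w < m ∧ pvG2 grid r (j / w) = 2
      · rw [if_pos hcon, if_pos ⟨hcon.1, hcon.2.1, by omega, hcon.2.2.2⟩]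
      · rw [if_neg hcon, if_neg (by
          intro hc2
          rcases Nat.lt_or_ge (j/w) m with hlt | hge
          · exact hcon ⟨hc2.1, hc2.2.1, hlt, hc2.2.2.2⟩
          · have hd : j / w = m := by omega
            rw [hd] at hc2
            exact hg hc2.2.2.2)]

theorem outer_char (grid : List (List Int)) (h w : Nat) (o : List (List Int)) (n : Nat)
    (hlen : o.length = h*3) (hrow : ∀ k < h*3, (o.getD k []).length = w*3)
    (hh : 0 < h) (hw : 0 < w) (hn : n ≤ h)
    (hP : ∀ r < h, ∀ c < w, (3 ≤ r ∨ 3 ≤ c) → pvG2 grid r c ≠ 2) :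
    ∀ i j, pvGet ((List.range n).foldl (fun o r => (List.range w).foldl
        (fun o c => if pvG2 grid r c = 2 then pvStamp grid h w r c o else o) o) o) i j
      = if i / h < n ∧ j / w < w ∧ pvG2 grid (i/h) (j/w) = 2
        then pvG2 grid (i % h) (j % w) else pvGet o i j := by
  induction n with
  | zero =>
    intro i j
    rw [List.range_zero, List.foldl_nil, if_neg (by rintro ⟨hlt, -, -⟩; exact Nat.not_lt_zero _ hlt)]
  | succ n ih =>
    intro i j
    rw [List.range_succ, List.foldl_append, List.foldl_cons, List.foldl_nil]
    have hsh := foldl_shape _ (List.range n)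
      (fun o r => foldl_shape _ (List.range w) (row_step_shape grid h w r) o) o
    have hlen' := hsh.1.trans hlen
    have hrow' : ∀ k < h*3, _ := fun k hk => (hsh.2 k).trans (hrow k hk)
    by_cases hn3 : n < 3
    · rw [row_char grid h w n _ w hlen' hrow' hn3 hw le_rfl
        (fun c hc h3 => hP n (by omega) c hc (Or.inr h3)) i j]
      split_ifs with h1 h2 h2
      · obtain ⟨hi1, hi2, _, _⟩ := h1
        have hd : i / h = n := (div_block i h n hh).mpr ⟨hi1, hi2⟩
        rw [mod_block i h n hd]
      · obtain ⟨hi1, hi2, hj1, hj2⟩ := h1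
        have hd : i / h = n := (div_block i h n hh).mpr ⟨hi1, hi2⟩
        exact absurd ⟨by omega, hj1, by rw [hd]; exact hj2⟩ h2
      · obtain ⟨hi1, hj1, hj2⟩ := h2
        rcases Nat.lt_or_ge (i/h) n with hlt | hge
        · rw [ih (by omega) i j, if_pos ⟨hlt, hj1, hj2⟩]
        · have hd : i / h = n := by omega
          obtain ⟨e1, e2⟩ := (div_block i h n hh).mp hd
          rw [hd] at hj2
          exact absurd ⟨e1, e2, hj1, hj2⟩ h1
      · rw [ih (by omega) i j, if_neg (fun hcon => h2 ⟨by omega, hcon.2.1, hcon.2.2⟩)]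
    · rw [foldl_id _ _ (fun o c hc => by
        rw [if_neg (hP n (by omega) c (by simpa using hc) (Or.inl (by omega)))])]
      rw [ih (by omega) i j]
      by_cases hcon : i / h < n ∧ j / w < w ∧ pvG2 grid (i/h) (j/w) = 2
      · rw [if_pos hcon, if_pos ⟨by omega, hcon.2.1, hcon.2.2⟩]
      · rw [if_neg hcon, if_neg (by
          intro hc2
          rcases Nat.lt_or_ge (i/h) n with hlt | hge
          · exact hcon ⟨hlt, hc2.2.1, hc2.2.2⟩
          · have hd : i / h = n := by omega
            rw [hd] at hc2
            exact hP n (by omega) (j/w) hc2.2.1 (Or.inl (by omega)) hc2.2.2)]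

theorem getD_replicate (n k : Nat) (a : List Int) :
    (List.replicate n a).getD k [] = if k < n then a else [] := by
  simp only [List.getD, List.getElem?_replicate]
  split_ifs <;> rfl

theorem pvGet_out0 (h w i j : Nat) :
    pvGet (List.replicate (h*3) (List.replicate (w*3) (0:Int))) i j = 0 := by
  rw [pvGet, getD_replicate]
  split_ifs with h1
  · simp only [List.getD, List.getElem?_replicate]
    split_ifs <;> rfl
  · rfl

theorem getD2_eq_getElem (o : List (List Int)) (i j : Nat)
    (hi : i < o.length) (hj : j < o[i].length) : pvGet o i j = o[i][j] := by
  rw [pvGet, List.getD_eq_getElem o [] hi, List.getD_eq_getElem _ 0 hj]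

theorem final_eq (grid : List (List Int))
    (hne : grid ≠ [])
    (hP : ∀ r < grid.length, ∀ c < (grid.getD 0 []).length,
      (3 ≤ r ∨ 3 ≤ c) → (grid.getD r []).getD c 0 ≠ 2) :
    solve_cce03e0d grid = solve_cce03e0d_alt grid := by
  have hh : 0 < grid.length := List.length_pos_iff.mpr hne
  show (List.range grid.length).foldl
      (fun o r => (List.range (grid.getD 0 []).length).foldl
        (fun o c => if pvG2 grid r c = 2 then pvStamp grid grid.length (grid.getD 0 []).length r c o else o) o)
      (List.replicate (grid.length*3) (List.replicate ((grid.getD 0 []).length*3) (0:Int)))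
    = (List.range (grid.length*3)).map (fun i =>
        (List.range ((grid.getD 0 []).length*3)).map (fun j =>
          if i / grid.length < grid.length ∧ j / (grid.getD 0 []).length < (grid.getD 0 []).length ∧
              (grid.getD (i / grid.length) []).getD (j / (grid.getD 0 []).length) 0 = 2
          then (grid.getD (i % grid.length) []).getD (j % (grid.getD 0 []).length) 0 else 0))
  rcases Nat.eq_zero_or_pos (grid.getD 0 []).length with hw0 | hw
  · rw [foldl_id _ _ (fun o r hr => by rw [hw0, List.range_zero, List.foldl_nil])]
    have hnil : grid.getD 0 [] = [] := List.eq_nil_of_length_eq_zero hw0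
    apply List.ext_getElem (by simp)
    intro i hi1 hi2
    have hnil' : grid[0]?.getD [] = ([] : List Int) := hnil
    simp [hnil']
  · have hlen0 : (List.replicate (grid.length*3) (List.replicate ((grid.getD 0 []).length*3) (0:Int))).length = grid.length*3 := by simp
    have hrow0 : ∀ k < grid.length*3,
        ((List.replicate (grid.length*3) (List.replicate ((grid.getD 0 []).length*3) (0:Int))).getD k []).length = (grid.getD 0 []).length*3 := by
      intro k hk
      rw [getD_replicate, if_pos hk]
      simp
    have hsh := foldl_shape _ (List.range grid.length)
      (fun o r => foldl_shape _ (List.range (grid.getD 0 []).length)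
        (row_step_shape grid grid.length (grid.getD 0 []).length r) o)
      (List.replicate (grid.length*3) (List.replicate ((grid.getD 0 []).length*3) (0:Int)))
    have hlenA := hsh.1.trans hlen0
    have hrowA : ∀ k < grid.length*3, _ := fun k hk => (hsh.2 k).trans (hrow0 k hk)
    have hchar := outer_char grid grid.length (grid.getD 0 []).length _ grid.length hlen0 hrow0 hh hw le_rfl hP
    apply List.ext_getElem (by rw [hlenA]; simp)
    intro i hi1 hi2
    have hiA : i < grid.length*3 := by rw [← hlenA]; exact hi1
    apply List.ext_getElem (by
      rw [← List.getD_eq_getElem _ [] hi1, hrowA i hiA]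
      simp)
    intro j hj1 hj2
    have hjA : j < (grid.getD 0 []).length*3 := by
      rw [← List.getD_eq_getElem _ [] hi1, hrowA i hiA] at hj1
      exact hj1
    rw [← getD2_eq_getElem _ i j hi1 hj1, hchar i j, pvGet_out0]
    simp only [List.getElem_map, List.getElem_range, pvG2]

-- ===== VERDICT (by name: the statement is the Claim_ definition above) =====
theorem solve_cce03e0d_spec : Claim_equal_solve_cce03e0d := by
  intro grid _hdom hpre
  exact final_eq grid hpre.1 hpre.2.2
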